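-- pv_equiv track=rewrite | github.com/reyesjl/aura-insurance-engine | add_watermark.py | text_to_zero_width
-- ===== SOURCE A (Python) =====
-- ZERO_WIDTH_SPACE = "\u200b"  # U+200B
--
-- ZERO_WIDTH_NON_JOINER = "\u200c"  # U+200C
--
-- ZERO_WIDTH_JOINER = "\u200d"  # U+200D
--
-- WORD_JOINER = "\u2060"  # U+2060
--
-- def text_to_zero_width(text):
--     """Convert text to zero-width character encoding."""
--     # Convert text to binary
--     binary = "".join(format(ord(char), "08b") for char in text)
--
--     # Map binary to zero-width characters
--     # 00 = ZERO_WIDTH_SPACE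
--     # 01 = ZERO_WIDTH_NON_JOINER
--     # 10 = ZERO_WIDTH_JOINER
--     # 11 = WORD_JOINER
--     result = ""
--     for i in range(0, len(binary), 2):
--         pair = binary[i : i + 2].ljust(2, "0")  # Pad if needed
--
--         if pair == "00":
--             result += ZERO_WIDTH_SPACE
--         elif pair == "01":
--             result += ZERO_WIDTH_NON_JOINER
--         elif pair == "10":
--             result += ZERO_WIDTH_JOINER
--         elif pair == "11":
--             result += WORD_JOINER
--
--     return result
-- ===== SOURCE B (Python) =====
-- ZERO_WIDTH_SPACE = "\u200b"  # U+200B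
-- ZERO_WIDTH_NON_JOINER = "\u200c"  # U+200C
-- ZERO_WIDTH_JOINER = "\u200d"  # U+200D
-- WORD_JOINER = "\u2060"  # U+2060
--
--
-- def _zw(q):
--     if q == 0:
--         return ZERO_WIDTH_SPACE
--     if q == 1:
--         return ZERO_WIDTH_NON_JOINER
--     if q == 2:
--         return ZERO_WIDTH_JOINER
--     return WORD_JOINER
--
--
-- def text_to_zero_width(text):
--     """Convert text to zero-width character encoding (ASCII input: 4 pairs per char)."""
--     return "".join(_zw((ord(ch) >> s) & 3) for ch in text for s in (6, 4, 2, 0))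
-- ===== Notes on version B (the rewrite author's own statement) =====
-- stated objective: alternative
-- what changed: Instead of concatenating all per-character 8-bit binary strings into one big bit string and re-scanning it with an index/slice loop, B emits the four zero-width characters for each input character directly by bit arithmetic (two-bit groups taken at shifts 6, 4, 2, 0), which coincides with A on the ASCII domain where every character contributes exactly 8 bits.
import Mathlib
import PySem

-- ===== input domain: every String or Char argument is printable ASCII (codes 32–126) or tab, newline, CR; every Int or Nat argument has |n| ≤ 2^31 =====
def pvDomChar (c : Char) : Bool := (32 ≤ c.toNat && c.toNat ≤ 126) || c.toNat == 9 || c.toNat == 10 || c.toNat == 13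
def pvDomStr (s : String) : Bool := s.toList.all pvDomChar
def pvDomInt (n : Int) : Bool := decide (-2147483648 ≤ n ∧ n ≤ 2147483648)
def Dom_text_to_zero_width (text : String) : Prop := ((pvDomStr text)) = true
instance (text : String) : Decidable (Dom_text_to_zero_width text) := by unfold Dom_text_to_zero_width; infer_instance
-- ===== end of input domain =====

-- B replaces A's build-whole-binary-string-then-rescan loop by direct per-character
-- bit arithmetic (four zero-width chars per input char), equal on the ASCII domain.


-- ===== PORT A =====
-- pair.ljust(2, "0"): hand port of str.ljust (exact: right-pad with fill to width w)
def pyLjust (cs : List Char) (w : Nat) (fill : Char) : List Char :=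
  cs ++ List.replicate (w - cs.length) fill

-- format(ord(char), "08b") = binary digits zero-padded to width 8
def fmt08b (n : Int) : List Char :=
  PySem.Chars.zfill (PySem.Int.toBinChars n) 8

def text_to_zero_width (text : String) : String :=
  let binary : List Char := (text.toList.map (fun c => fmt08b (Int.ofNat c.toNat))).flatten
  let result : List Char :=
    (PySem.List.pyRange 0 (PySem.List.len binary) 2).foldl
      (fun result i =>
        let pair := pyLjust (PySem.List.slice binary (some i) (some (i + 2))) 2 '0'
        if pair = ['0', '0'] then result ++ ['\u200b']
        else if pair = ['0', '1'] then result ++ ['\u200c']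
        else if pair = ['1', '0'] then result ++ ['\u200d']
        else if pair = ['1', '1'] then result ++ ['\u2060']
        else result) []
  String.mk result

-- ===== PORT B =====
def zwOf (q : Nat) : Char :=
  if q = 0 then '\u200b'
  else if q = 1 then '\u200c'
  else if q = 2 then '\u200d'
  else '\u2060'

def text_to_zero_width_alt (text : String) : String :=
  String.mk (text.toList.flatMap (fun ch =>
    [6, 4, 2, 0].map (fun s => zwOf ((ch.toNat >>> s) &&& 3))))

-- ===== PRECONDITION & SPEC =====
def Spec_text_to_zero_width (text : String) (out : String) : Prop := out = text_to_zero_width_alt text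
instance (text : String) (out : String) : Decidable (Spec_text_to_zero_width text out) := by unfold Spec_text_to_zero_width; infer_instance

-- ===== CLAIM (what is proved, stated in full; the proofs are below) =====
def Claim_equal_text_to_zero_width : Prop := ∀ (text : String), Dom_text_to_zero_width text → Spec_text_to_zero_width text (text_to_zero_width text)

-- ===== LEMMAS AND PROOFS =====

-- the value appended for one two-bit pair (mirrors A's if-chain)
def encPair (pair : List Char) : List Char :=
  if pair = ['0', '0'] then ['\u200b']
  else if pair = ['0', '1'] then ['\u200c']
  else if pair = ['1', '0'] then ['\u200d']
  else if pair = ['1', '1'] then ['\u2060']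
  else []

-- structural two-at-a-time pairwise encoding of a bit list
def pairEnc : List Char → List Char
  | [] => []
  | [a] => encPair [a, '0']
  | a :: b :: t => encPair [a, b] ++ pairEnc t

theorem encStep_eq (pair acc : List Char) :
    (if pair = ['0', '0'] then acc ++ ['\u200b']
     else if pair = ['0', '1'] then acc ++ ['\u200c']
     else if pair = ['1', '0'] then acc ++ ['\u200d']
     else if pair = ['1', '1'] then acc ++ ['\u2060']
     else acc) = acc ++ encPair pair := by
  unfold encPair; split_ifs <;> simp

theorem flat_eq (bs : List Char) :
    (List.range ((bs.length + 1) / 2)).flatMap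
      (fun k => encPair (pyLjust (List.take 2 (List.drop (2 * k) bs)) 2 '0')) = pairEnc bs := by
  induction bs using pairEnc.induct with
  | case1 => simp [pairEnc]
  | case2 a => simp [pairEnc, pyLjust]
  | case3 a b t ih =>
      have hlen : ((a :: b :: t).length + 1) / 2 = (t.length + 1) / 2 + 1 := by
        simp [List.length_cons]; omega
      rw [hlen, List.range_succ_eq_map]
      simp only [List.flatMap_cons, List.flatMap_map]
      have h0 : encPair (pyLjust (List.take 2 (List.drop (2 * 0) (a :: b :: t))) 2 '0')
          = encPair [a, b] := by
        simp [pyLjust]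
      rw [h0]
      have hrest : ∀ k : Nat, List.drop (2 * (k + 1)) (a :: b :: t) = List.drop (2 * k) t := by
        intro k
        have : 2 * (k + 1) = (2 * k) + 1 + 1 := by omega
        rw [this]; rfl
      have hfun : (List.range ((t.length + 1) / 2)).flatMap
            (fun k => encPair (pyLjust (List.take 2 (List.drop (2 * (k + 1)) (a :: b :: t))) 2 '0'))
          = pairEnc t := by
        rw [← ih]
        exact List.flatMap_congr (fun k _ => by rw [hrest k])
      simp only [Nat.succ_eq_add_one]
      rw [hfun, pairEnc]

-- A's index/slice loop over any bit list computes pairEnc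
theorem loop_eq (bs : List Char) (acc : List Char) :
    (PySem.List.pyRange 0 (PySem.List.len bs) 2).foldl
      (fun result i =>
        let pair := pyLjust (PySem.List.slice bs (some i) (some (i + 2))) 2 '0'
        if pair = ['0', '0'] then result ++ ['\u200b']
        else if pair = ['0', '1'] then result ++ ['\u200c']
        else if pair = ['1', '0'] then result ++ ['\u200d']
        else if pair = ['1', '1'] then result ++ ['\u2060']
        else result) acc
      = acc ++ pairEnc bs := by
  rw [PySem.List.pyRange_of_pos 0 (PySem.List.len bs) (by norm_num)]
  have hn : (if (0 : Int) < PySem.List.len bs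
        then (((PySem.List.len bs) - 0 + 2 - 1) / 2).toNat else 0) = (bs.length + 1) / 2 := by
    simp [PySem.List.len_eq]
    split_ifs with h
    · omega
    · omega
  rw [hn, List.foldl_map]
  have hbody : ∀ (acc : List Char) (k : Nat),
      (fun result i =>
        let pair := pyLjust (PySem.List.slice bs (some i) (some (i + 2))) 2 '0'
        if pair = ['0', '0'] then result ++ ['\u200b']
        else if pair = ['0', '1'] then result ++ ['\u200c']
        else if pair = ['1', '0'] then result ++ ['\u200d']
        else if pair = ['1', '1'] then result ++ ['\u2060']
        else result) acc ((0 : Int) + 2 * (k : Int))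
      = acc ++ encPair (pyLjust (List.take 2 (List.drop (2 * k) bs)) 2 '0') := by
    intro acc k
    have hc : (0 : Int) + 2 * (k : Int) = ((2 * k : Nat) : Int) := by push_cast; ring
    have hs : PySem.List.slice bs (some ((2 * k : Nat) : Int)) (some (((2 * k : Nat) : Int) + 2))
        = List.take 2 (List.drop (2 * k) bs) := by
      have := PySem.List.slice_natCast_add bs (2 * k) 2
      simpa using this
    simp only [hc, hs]
    exact encStep_eq _ acc
  rw [PySem.List.foldl_congr_mem _ _
      (fun r k => r ++ encPair (pyLjust (List.take 2 (List.drop (2 * k) bs)) 2 '0')) acc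
      (fun r k _ => hbody r k)]
  rw [PySem.List.foldl_append_eq_flatMap, flat_eq]

-- per-character agreement on the ASCII domain, by finite check
set_option maxHeartbeats 2000000 in
theorem perChar : ∀ n : Nat, n < 128 →
    (fmt08b (Int.ofNat n)).length % 2 = 0 ∧
    pairEnc (fmt08b (Int.ofNat n)) = [6, 4, 2, 0].map (fun s => zwOf ((n >>> s) &&& 3)) := by
  decide

theorem pairEnc_append_even (xs rest : List Char) (h : xs.length % 2 = 0) :
    pairEnc (xs ++ rest) = pairEnc xs ++ pairEnc rest := by
  induction xs using pairEnc.induct with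
  | case1 => simp [pairEnc]
  | case2 a => simp at h
  | case3 a b t ih =>
      have : t.length % 2 = 0 := by simp [List.length_cons] at h; omega
      simp only [List.cons_append, pairEnc, ih this, List.append_assoc]

theorem main_eq (cs : List Char) (h : cs.all pvDomChar) :
    pairEnc ((cs.map (fun c => fmt08b (Int.ofNat c.toNat))).flatten)
      = cs.flatMap (fun ch => [6, 4, 2, 0].map (fun s => zwOf ((ch.toNat >>> s) &&& 3))) := by
  induction cs with
  | nil => simp [pairEnc]
  | cons c t ih =>
      simp only [List.all_cons, Bool.and_eq_true] at h
      have hlt : c.toNat < 128 := by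
        unfold pvDomChar at h
        have := h.1
        simp only [Bool.or_eq_true, Bool.and_eq_true, beq_iff_eq, decide_eq_true_eq] at this
        omega
      obtain ⟨heven, henc⟩ := perChar c.toNat hlt
      simp only [List.map_cons, List.flatten_cons, List.flatMap_cons]
      rw [pairEnc_append_even _ _ heven, henc, ih h.2]
      simp

-- ===== VERDICT (by name: the statement is the Claim_ definition above) =====
theorem text_to_zero_width_spec : Claim_equal_text_to_zero_width := by
  intro text hdom
  unfold Spec_text_to_zero_width text_to_zero_width text_to_zero_width_alt
  simp only []
  rw [loop_eq, List.nil_append,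
    main_eq text.toList (by simpa [pvDomStr, Dom_text_to_zero_width] using hdom)]
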